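-- pv_equiv track=rewrite | github.com/pypi-data/pypi-mirror-401 | packages/ui-tars/ui_tars-0.4.6.2-py3-none-any.whl/ui_tars/formatter_xml05.py | _normalize_indented_text
-- ===== SOURCE A (Python) =====
-- def _normalize_indented_text(text):
--     """标准化缩进的文本，移除公共缩进"""
--     lines = text.split("\n")
--
--     # 移除前后空行
--     while lines and not lines[0].strip():
--         lines.pop(0)
--     while lines and not lines[-1].strip():
--         lines.pop()
--
--     if not lines:
--         return ""
--
--     # 找到最小缩进（忽略空行）
--     non_empty_lines = [line for line in lines if line.strip()]
--     if not non_empty_lines: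
--         return ""
--
--     min_indent = min(len(line) - len(line.lstrip()) for line in non_empty_lines)
--
--     # 移除公共缩进
--     normalized_lines = []
--     for line in lines:
--         if line.strip():  # 非空行
--             normalized_lines.append(
--                 line[min_indent:] if len(line) >= min_indent else line
--             )
--         else:  # 空行
--             normalized_lines.append("")
--
--     return "".join(normalized_lines)
-- ===== SOURCE B (Python) =====
-- def _normalize_indented_text(text):
--     """Blank lines contribute nothing to the final "".join, so only the
--     dedented non-blank lines matter: one filter, one min, one join."""
--     non_empty = [l for l in text.split("\n") if l.strip()]
--     if not non_empty:
--         return ""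
--     m = min(len(l) - len(l.lstrip()) for l in non_empty)
--     return "".join(l[m:] for l in non_empty)
-- ===== Notes on version B (the rewrite author's own statement) =====
-- stated objective: simpler
-- what changed: Since the result is an empty-separator join, blank lines contribute nothing, so B drops both while-pop trimming passes and the blank-line branch and simply dedents and joins the non-blank lines in one pass.
import Mathlib
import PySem

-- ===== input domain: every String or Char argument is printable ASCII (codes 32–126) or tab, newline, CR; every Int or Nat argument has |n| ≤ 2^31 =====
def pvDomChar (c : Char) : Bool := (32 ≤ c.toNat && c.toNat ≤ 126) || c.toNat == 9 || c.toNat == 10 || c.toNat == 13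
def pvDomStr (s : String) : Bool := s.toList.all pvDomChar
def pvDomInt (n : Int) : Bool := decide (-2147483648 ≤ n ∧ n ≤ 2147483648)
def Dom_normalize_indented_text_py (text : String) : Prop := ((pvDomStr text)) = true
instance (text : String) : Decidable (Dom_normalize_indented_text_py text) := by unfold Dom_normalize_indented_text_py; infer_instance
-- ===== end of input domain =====

-- B drops A's two while-pop trimming passes and the blank-line branch: with an
-- empty-separator join, blank lines contribute nothing, so B dedents and joins
-- the non-blank lines only (objective: simpler; return value proved equal).

-- ===== PORT A =====

-- 'while lines and not lines[0].strip(): lines.pop(0)'  (drop leading blank lines)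
def pvTrimFrontA : List (List Char) → List (List Char)
  | [] => []
  | l :: ls => if (PySem.Chars.strip l).isEmpty then pvTrimFrontA ls else l :: ls

-- 'while lines and not lines[-1].strip(): lines.pop()'  (pop from the back = front loop on the reverse)
def pvTrimBackA (ls : List (List Char)) : List (List Char) :=
  (pvTrimFrontA ls.reverse).reverse

def normalize_indented_text_py (text : String) : String :=
  let lines := PySem.Chars.splitOn text.toList "\n".toList      -- text.split("\n")
  let lines := pvTrimFrontA lines
  let lines := pvTrimBackA lines
  if lines.isEmpty then "" else
  let non_empty_lines := lines.filter (fun l => !(PySem.Chars.strip l).isEmpty)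
  if non_empty_lines.isEmpty then "" else
  let min_indent :=
    ((PySem.List.min? (non_empty_lines.map
        (fun l => l.length - (PySem.Chars.lstrip l).length)) (fun x => x)).getD 0)
  let normalized_lines := lines.foldl (fun acc l =>
      acc ++ [if !(PySem.Chars.strip l).isEmpty then
                (if min_indent ≤ l.length then PySem.Chars.slice l (some (min_indent : Int)) none else l)
              else ([] : List Char)]) []
  String.ofList (PySem.Chars.join [] normalized_lines)

-- ===== PORT B =====
def normalize_indented_text_py_alt (text : String) : String :=
  let non_empty := (PySem.Chars.splitOn text.toList "\n".toList).filter
      (fun l => !(PySem.Chars.strip l).isEmpty)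
  if non_empty.isEmpty then "" else
  let m := ((PySem.List.min? (non_empty.map
      (fun l => l.length - (PySem.Chars.lstrip l).length)) (fun x => x)).getD 0)
  String.ofList (PySem.Chars.join [] (non_empty.map
      (fun l => PySem.Chars.slice l (some (m : Int)) none)))

-- ===== PRECONDITION & SPEC =====
def Spec_normalize_indented_text_py (text : String) (out : String) : Prop := out = normalize_indented_text_py_alt text
instance (text : String) (out : String) : Decidable (Spec_normalize_indented_text_py text out) := by unfold Spec_normalize_indented_text_py; infer_instance

-- ===== CLAIM (what is proved, stated in full; the proofs are below) =====
def Claim_equal_normalize_indented_text_py : Prop := ∀ (text : String), Dom_normalize_indented_text_py text → Spec_normalize_indented_text_py text (normalize_indented_text_py text)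

-- ===== LEMMAS AND PROOFS =====

-- trimming only removes blank lines, so the non-blank filter is unchanged
theorem pv_filter_trimFront (xs : List (List Char)) :
    (pvTrimFrontA xs).filter (fun l => !(PySem.Chars.strip l).isEmpty)
      = xs.filter (fun l => !(PySem.Chars.strip l).isEmpty) := by
  induction xs with
  | nil => rfl
  | cons l ls ih =>
    by_cases h : (PySem.Chars.strip l).isEmpty <;>
      simp [pvTrimFrontA, h, ih]

theorem pv_filter_trimBack (xs : List (List Char)) :
    (pvTrimBackA xs).filter (fun l => !(PySem.Chars.strip l).isEmpty)
      = xs.filter (fun l => !(PySem.Chars.strip l).isEmpty) := by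
  simp [pvTrimBackA, List.filter_reverse, pv_filter_trimFront]

-- the foldl building 'normalized_lines' is a map
theorem pv_foldl_append_map {α β : Type} (g : α → β) (xs : List α) (acc : List β) :
    xs.foldl (fun a l => a ++ [g l]) acc = acc ++ xs.map g := by
  induction xs generalizing acc with
  | nil => simp
  | cons x xs ih => simp [List.foldl_cons, ih]

theorem pv_intercalate_nil {α : Type} (xs : List (List α)) :
    List.intercalate ([] : List α) xs = xs.flatten := by
  induction xs with
  | nil => rfl
  | cons x t ih =>
    cases t with
    | nil => simp [List.intercalate]
    | cons y ts =>
      simp only [List.intercalate, List.intersperse] at *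
      simp_all [List.flatten]

-- blank lines contribute [] to an empty-separator flatten, so they may be dropped
theorem pv_flatten_skip_blanks (p : List Char → Bool) (g : List Char → List Char)
    (xs : List (List Char)) :
    (xs.map (fun l => if p l then g l else [])).flatten =
      ((xs.filter p).map g).flatten := by
  induction xs with
  | nil => rfl
  | cons l ls ih => by_cases h : p l <;> simp [h, ih]

theorem normalize_indented_text_core (text : String) :
    normalize_indented_text_py text = normalize_indented_text_py_alt text := by
  unfold normalize_indented_text_py normalize_indented_text_py_alt
  generalize PySem.Chars.splitOn text.toList "\n".toList = L
  by_cases hfil : L.filter (fun l => !(PySem.Chars.strip l).isEmpty) = []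
  · by_cases ht : pvTrimBackA (pvTrimFrontA L) = []
    · simp [ht, hfil]
    · have : (pvTrimBackA (pvTrimFrontA L)).filter (fun l => !(PySem.Chars.strip l).isEmpty) = [] := by
        rw [pv_filter_trimBack, pv_filter_trimFront, hfil]
      simp [ht, hfil, this]
  · have hfe : (pvTrimBackA (pvTrimFrontA L)).filter (fun l => !(PySem.Chars.strip l).isEmpty)
        = L.filter (fun l => !(PySem.Chars.strip l).isEmpty) := by
      rw [pv_filter_trimBack, pv_filter_trimFront]
    have ht : pvTrimBackA (pvTrimFrontA L) ≠ [] := by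
      intro h
      exact hfil (by rw [← hfe, h]; rfl)
    simp only [List.isEmpty_iff, hfe, hfil, ht, if_false]
    rw [pv_foldl_append_map, List.nil_append]
    set nbl := L.filter (fun l => !(PySem.Chars.strip l).isEmpty) with hnbl
    set m := ((PySem.List.min? (nbl.map
        (fun l => l.length - (PySem.Chars.lstrip l).length)) (fun x => x)).getD 0) with hm
    have hbound : ∀ l ∈ nbl, m ≤ l.length := by
      intro l hl
      have hmem : l.length - (PySem.Chars.lstrip l).length ∈
          nbl.map (fun l => l.length - (PySem.Chars.lstrip l).length) :=
        List.mem_map_of_mem hl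
      rcases hmin : PySem.List.min? (nbl.map
          (fun l => l.length - (PySem.Chars.lstrip l).length)) (fun x => x) with _ | mv
      · rw [PySem.List.min?_eq_none_iff] at hmin; simp [hmin] at hmem
      · have := PySem.List.min?_isMin hmin _ hmem
        simp only [hm, hmin, Option.getD_some]
        omega
    have hofl : ∀ xs : List (List Char), PySem.Chars.join ([] : List Char) xs = xs.flatten := by
      intro xs; simp [PySem.Chars.join, pv_intercalate_nil]
    rw [hofl, hofl,
      pv_flatten_skip_blanks (fun l => !(PySem.Chars.strip l).isEmpty)
        (fun l => if m ≤ l.length then PySem.Chars.slice l (some (m : Int)) none else l),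
      hfe]
    exact congrArg (fun xs => String.ofList (List.flatten xs))
      (List.map_congr_left (fun l hl => if_pos (hbound l hl)))

-- ===== VERDICT (by name: the statement is the Claim_ definition above) =====
theorem normalize_indented_text_py_spec : Claim_equal_normalize_indented_text_py := by
  intro text _
  exact normalize_indented_text_core text
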